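-- pv_equiv track=rewrite | github.com/daffa-dil/Calcudoku | calcudoku_funcs.py | validate_cols
-- ===== SOURCE A (Python) =====
-- def transpose(grid):
--    t_grid = []
--    t_grid1 = []
--    for i in range(5):
--       for x in range(5):
--          t_grid.append(grid[x][i])
--    for i in range(0, 25, 5):
--       t_grid1.append(t_grid[i:i+5])
--    return t_grid1
--
-- def validate_cols(grid):
--    t_grid = transpose(grid)
--    for i in t_grid:
--       w = 0
--       while w < 5:
--          val = i[w]
--          for x in i:
--             if x == 0:
--                continue
--             if i.index(x) == w:
--                continue
--             elif x == val:
--                return False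
--          w += 1
--    return True
-- ===== SOURCE B (Python) =====
-- def validate_cols(grid):
--    for c in range(5):
--       col = [grid[r][c] for r in range(5)]
--       seen = set()
--       for v in col:
--          if v == 0:
--             continue
--          if v in seen:
--             return False
--          seen.add(v)
--    return True
-- ===== Notes on version B (the rewrite author's own statement) =====
-- stated objective: simpler
-- what changed: Replaces the explicit transpose construction plus the per-column nested while/for with repeated list.index rescans by one direct single pass over each column that maintains a 'seen' set of nonzero values, returning False on the first repeat.
import Mathlib
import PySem

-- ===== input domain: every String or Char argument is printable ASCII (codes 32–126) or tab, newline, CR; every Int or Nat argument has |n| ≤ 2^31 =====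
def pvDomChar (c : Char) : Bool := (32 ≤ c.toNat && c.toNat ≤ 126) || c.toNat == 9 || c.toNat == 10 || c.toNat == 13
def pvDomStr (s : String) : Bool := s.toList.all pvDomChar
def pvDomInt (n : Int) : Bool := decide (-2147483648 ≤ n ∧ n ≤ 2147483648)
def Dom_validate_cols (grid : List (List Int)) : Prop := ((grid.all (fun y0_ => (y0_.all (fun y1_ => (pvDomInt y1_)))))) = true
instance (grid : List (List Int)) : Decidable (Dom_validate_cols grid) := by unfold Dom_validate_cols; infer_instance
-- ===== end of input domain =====

-- B replaces the transpose + nested index-rescanning column check by a single seen-set pass per column (objective: simpler).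
-- ===== PORT A =====
-- helper: A's transpose(grid) (grid[x][i] totalized with defaults; exact on Pre_, where Python never hits them)
def pvTranspose (grid : List (List Int)) : List (List Int) :=
  let t_grid := (PySem.List.pyRange 0 5 1).foldl (fun acc i =>
      (PySem.List.pyRange 0 5 1).foldl (fun acc2 x =>
        acc2 ++ [PySem.List.pyGetD (PySem.List.pyGetD grid x []) i 0]) acc) []
  (PySem.List.pyRange 0 25 5).foldl (fun acc i =>
      acc ++ [PySem.List.slice t_grid (some i) (some (i + 5))]) []


-- helper: the body of A's 'while w < 5: ... for x in i: ...' column check (early 'return False' = any)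
def pvColBad (i : List Int) : Bool :=
  (PySem.List.pyRange 0 5 1).any (fun w =>
    let val := PySem.List.pyGetD i w 0
    i.any (fun x =>
      !(x == 0) && !((PySem.List.index? i x).map (fun k => (k : Int)) == some w) && (x == val)))


def validate_cols (grid : List (List Int)) : Bool :=
  !((pvTranspose grid).any pvColBad)


-- ===== PORT B =====
-- helper: B's inner 'for v in col' loop with its seen set
def pvColOk : List Int → PySem.Set Int → Bool
  | [], _ => true
  | v :: rest, seen =>
    if v == 0 then pvColOk rest seen
    else if PySem.Set.contains seen v then false
    else pvColOk rest (PySem.Set.add seen v)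


def validate_cols_alt (grid : List (List Int)) : Bool :=
  (PySem.List.pyRange 0 5 1).all (fun c =>
    pvColOk ((PySem.List.pyRange 0 5 1).map (fun r =>
      PySem.List.pyGetD (PySem.List.pyGetD grid r []) c 0)) PySem.Set.empty)


-- ===== PRECONDITION & SPEC =====
-- Pre_: exactly where Python A returns; outside it grid[x][i] raises IndexError (x,i < 5).
def Pre_validate_cols (grid : List (List Int)) : Prop :=
  5 ≤ grid.length ∧ ∀ row ∈ grid.take 5, 5 ≤ row.length
instance (grid : List (List Int)) : Decidable (Pre_validate_cols grid) := by
  unfold Pre_validate_cols; infer_instance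
def pvWitness_validate_cols : List (List Int) :=
  [[1, 2, 3, 0, 0], [2, 3, 1, 0, 4], [3, 1, 2, 4, 0], [0, 0, 4, 1, 2], [4, 0, 0, 2, 1]]
def Spec_validate_cols (grid : List (List Int)) (out : Bool) : Prop := out = validate_cols_alt grid
instance (grid : List (List Int)) (out : Bool) : Decidable (Spec_validate_cols grid out) := by
  unfold Spec_validate_cols; infer_instance

-- ===== CLAIM (what is proved, stated in full; the proofs are below) =====
def Claim_equal_validate_cols : Prop := ∀ (grid : List (List Int)), Dom_validate_cols grid → Pre_validate_cols grid → Spec_validate_cols grid (validate_cols grid)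

-- ===== LEMMAS AND PROOFS =====
-- B-side characterization
lemma colOk_false_iff (l : List Int) (seen : PySem.Set Int) :
    pvColOk l seen = false ↔
      ∃ w < l.length, l.getD w 0 ≠ 0 ∧
        (l.getD w 0 ∈ seen ∨ ∃ j < w, l.getD j 0 = l.getD w 0) := by
  induction l generalizing seen with
  | nil => simp [pvColOk]
  | cons v t ih =>
    by_cases hv : v = 0
    · subst hv
      simp only [pvColOk, beq_self_eq_true, if_true, ih]
      constructor
      · rintro ⟨w, hw, hne, hrest⟩
        refine ⟨w + 1, by simpa using hw, by simpa using hne, ?_⟩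
        rcases hrest with h | ⟨j, hj, hEq⟩
        · exact Or.inl (by simpa using h)
        · exact Or.inr ⟨j + 1, by omega, by simpa using hEq⟩
      · rintro ⟨w, hw, hne, hrest⟩
        cases w with
        | zero => simp at hne
        | succ w =>
          refine ⟨w, by simpa using hw, by simpa using hne, ?_⟩
          rcases hrest with h | ⟨j, hj, hEq⟩
          · exact Or.inl (by simpa using h)
          · cases j with
            | zero => simp at hEq hne; exact absurd hEq.symm hne
            | succ j => exact Or.inr ⟨j, by omega, by simpa using hEq⟩
    · by_cases hc : v ∈ seen
      · have : pvColOk (v :: t) seen = false := by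
          simp [pvColOk, hv, PySem.Set.contains, hc]
        rw [this]
        simp only [true_iff]
        exact ⟨0, by simp, by simpa using hv, Or.inl (by simpa using hc)⟩
      · have hstep : pvColOk (v :: t) seen = pvColOk t (PySem.Set.add seen v) := by
          simp [pvColOk, hv, PySem.Set.contains, hc]
        have hadd : PySem.Set.add seen v = seen ++ [v] := by
          simp [PySem.Set.add, PySem.Set.contains, hc]
        rw [hstep, ih, hadd]
        constructor
        · rintro ⟨w, hw, hne, hrest⟩
          refine ⟨w + 1, by simpa using hw, by simpa using hne, ?_⟩
          rcases hrest with h | ⟨j, hj, hEq⟩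
          · rcases List.mem_append.mp h with h | h
            · exact Or.inl (by simpa using h)
            · simp at h; exact Or.inr ⟨0, by omega, by simpa using h.symm⟩
          · exact Or.inr ⟨j + 1, by omega, by simpa using hEq⟩
        · rintro ⟨w, hw, hne, hrest⟩
          cases w with
          | zero =>
            simp only [List.getD_cons_zero] at hne hrest
            rcases hrest with h | ⟨j, hj, _⟩
            · exact absurd h hc
            · omega
          | succ w =>
            refine ⟨w, by simpa using hw, by simpa using hne, ?_⟩
            rcases hrest with h | ⟨j, hj, hEq⟩
            · exact Or.inl (List.mem_append.mpr (Or.inl (by simpa using h)))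
            · cases j with
              | zero =>
                simp only [List.getD_cons_zero] at hEq
                exact Or.inl (List.mem_append.mpr (Or.inr (List.mem_singleton.mpr hEq.symm)))
              | succ j => exact Or.inr ⟨j, by omega, by simpa using hEq⟩


lemma wBad_iff (l : List Int) (w : Nat) (hw : w < l.length) :
    (l.any (fun x =>
      !(x == 0) && !((PySem.List.index? l x).map (fun k => (k : Int)) == some ((w : Nat) : Int)) &&
        (x == l.getD w 0))) = true ↔
      (l.getD w 0 ≠ 0 ∧ ∃ j < w, l.getD j 0 = l.getD w 0) := by
  have hgd : l.getD w 0 = l[w] := List.getD_eq_getElem l 0 hw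
  have hmem : l.getD w 0 ∈ l := by rw [hgd]; exact List.getElem_mem hw
  rw [List.any_eq_true]
  constructor
  · rintro ⟨x, hx, hp⟩
    simp only [Bool.and_eq_true, Bool.not_eq_true', beq_eq_false_iff_ne, ne_eq, beq_iff_eq] at hp
    obtain ⟨⟨hx0, hidx⟩, hxv⟩ := hp
    subst hxv
    refine ⟨hx0, ?_⟩
    obtain ⟨m, hm⟩ := Option.isSome_iff_exists.mp ((PySem.List.index?_isSome_iff l (l.getD w 0)).mpr hmem)
    obtain ⟨hmlt, hml, hmin⟩ := PySem.List.getElem_of_index?_eq_some hm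
    rw [hm] at hidx
    have hmw : m ≠ w := by
      intro h; apply hidx; simp [h]
    have hmltw : m < w := by
      rcases Nat.lt_or_ge m w with h | h
      · exact h
      · have : m ≠ w := hmw
        have hwm : w < m := by omega
        exact absurd hgd.symm (hmin w hwm)
    exact ⟨m, hmltw, by rw [List.getD_eq_getElem l 0 hmlt]; exact hml⟩
  · rintro ⟨hne, j, hj, hEq⟩
    refine ⟨l.getD w 0, hmem, ?_⟩
    obtain ⟨m, hm⟩ := Option.isSome_iff_exists.mp ((PySem.List.index?_isSome_iff l (l.getD w 0)).mpr hmem)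
    obtain ⟨hmlt, hml, hmin⟩ := PySem.List.getElem_of_index?_eq_some hm
    have hjlt : j < l.length := by omega
    have hmj : m ≤ j := by
      by_contra h
      exact (hmin j (by omega)) (by rw [← List.getD_eq_getElem l 0 hjlt]; exact hEq)
    simp only [hm, Bool.and_eq_true, Bool.not_eq_true', beq_eq_false_iff_ne, ne_eq,
      beq_iff_eq]
    refine ⟨⟨hne, ?_⟩, trivial⟩
    intro hcontra
    simp at hcontra
    omega


lemma colBad_iff (l : List Int) (h : l.length = 5) :
    pvColBad l = true ↔
      ∃ w < l.length, l.getD w 0 ≠ 0 ∧ ∃ j < w, l.getD j 0 = l.getD w 0 := by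
  unfold pvColBad
  rw [List.any_eq_true]
  constructor
  · rintro ⟨wi, hwi, hp⟩
    rw [PySem.List.mem_pyRange_one] at hwi
    obtain ⟨h0, h5⟩ := hwi
    set w := wi.toNat with hwdef
    have hcast : wi = (w : Int) := by omega
    have hwlt : w < l.length := by omega
    rw [hcast] at hp
    rw [PySem.List.pyGetD_natCast] at hp
    rw [wBad_iff l w hwlt] at hp
    exact ⟨w, hwlt, hp⟩
  · rintro ⟨w, hw, hp⟩
    refine ⟨(w : Int), ?_, ?_⟩
    · rw [PySem.List.mem_pyRange_one]; omega
    · simp only [PySem.List.pyGetD_natCast]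
      exact (wBad_iff l w hw).mpr hp


lemma colBad_eq (l : List Int) (h : l.length = 5) :
    pvColBad l = !(pvColOk l PySem.Set.empty) := by
  have h1 := colBad_iff l h
  have h2 := colOk_false_iff l PySem.Set.empty
  have h2' : pvColOk l PySem.Set.empty = false ↔
      ∃ w < l.length, l.getD w 0 ≠ 0 ∧ ∃ j < w, l.getD j 0 = l.getD w 0 := by
    rw [h2]
    constructor
    · rintro ⟨w, hw, hne, hrest⟩
      rcases hrest with hmem | hrest
      · exact absurd hmem (by simp [PySem.Set.empty])
      · exact ⟨w, hw, hne, hrest⟩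
    · rintro ⟨w, hw, hne, hrest⟩
      exact ⟨w, hw, hne, Or.inr hrest⟩
  cases hB : pvColOk l PySem.Set.empty with
  | false => simp only [Bool.not_false]; exact h1.mpr (h2'.mp hB)
  | true =>
    simp only [Bool.not_true]
    rw [← Bool.not_eq_true]
    rw [h1]
    intro hcontra
    have := h2'.mpr hcontra
    rw [hB] at this
    simp at this


lemma transpose_eq (grid : List (List Int)) :
    pvTranspose grid = (PySem.List.pyRange 0 5 1).map (fun c =>
      (PySem.List.pyRange 0 5 1).map (fun r =>
        PySem.List.pyGetD (PySem.List.pyGetD grid r []) c 0)) := by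
  have h5 : PySem.List.pyRange 0 5 1 = [0, 1, 2, 3, 4] := by decide
  have h25 : PySem.List.pyRange 0 25 5 = [0, 5, 10, 15, 20] := by decide
  simp only [pvTranspose, h5, h25, List.foldl_cons, List.foldl_nil, List.map_cons, List.map_nil,
    List.nil_append, List.cons_append]
  norm_num [PySem.List.slice, PySem.List.clampIdx]
  exact ⟨rfl, rfl, rfl, rfl, rfl⟩


lemma not_any_eq_all {α : Type} (l : List α) (p q : α → Bool)
    (h : ∀ x ∈ l, p x = !q x) : (!(l.any p)) = l.all q := by
  induction l with
  | nil => simp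
  | cons x t ih =>
    simp only [List.any_cons, List.all_cons, Bool.not_or,
      h x (List.mem_cons_self), Bool.not_not]
    rw [ih (fun y hy => h y (List.mem_cons_of_mem x hy))]


theorem main_eq (grid : List (List Int)) : validate_cols grid = validate_cols_alt grid := by
  unfold validate_cols validate_cols_alt
  rw [transpose_eq, List.any_map]
  exact not_any_eq_all (PySem.List.pyRange 0 5 1) _ _
    (fun c _ => colBad_eq _ (by simp [PySem.List.length_pyRange_one]))

-- ===== VERDICT (by name: the statement is the Claim_ definition above) =====
theorem validate_cols_spec : Claim_equal_validate_cols := by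
  intro grid _ _
  exact main_eq grid
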